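-- pv_equiv track=rewrite | github.com/newnewhouston/MangaFactory | MangaFactory.py | deduplicate_chapters
-- ===== SOURCE A (Python) =====
-- def deduplicate_chapters(chapters):
--     seen = {}
--     result = []
--     for ch in chapters:
--         key = ch["chapter"]
--         if key not in seen:
--             seen[key] = True
--             result.append(ch)
--     return result
-- ===== SOURCE B (Python) =====
-- def deduplicate_chapters(chapters):
--     result = []
--     rest = chapters
--     while rest:
--         head = rest[0]
--         key = head["chapter"]
--         result.append(head)
--         rest = [ch for ch in rest[1:] if ch["chapter"] != key]
--     return result
-- ===== Notes on version B (the rewrite author's own statement) =====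
-- stated objective: alternative
-- what changed: Replaces the seen-dict single pass by repeated head extraction: take the first remaining chapter, filter every later chapter with the same key out of the remainder, and repeat until empty - no dict or membership set at all.
import Mathlib
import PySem

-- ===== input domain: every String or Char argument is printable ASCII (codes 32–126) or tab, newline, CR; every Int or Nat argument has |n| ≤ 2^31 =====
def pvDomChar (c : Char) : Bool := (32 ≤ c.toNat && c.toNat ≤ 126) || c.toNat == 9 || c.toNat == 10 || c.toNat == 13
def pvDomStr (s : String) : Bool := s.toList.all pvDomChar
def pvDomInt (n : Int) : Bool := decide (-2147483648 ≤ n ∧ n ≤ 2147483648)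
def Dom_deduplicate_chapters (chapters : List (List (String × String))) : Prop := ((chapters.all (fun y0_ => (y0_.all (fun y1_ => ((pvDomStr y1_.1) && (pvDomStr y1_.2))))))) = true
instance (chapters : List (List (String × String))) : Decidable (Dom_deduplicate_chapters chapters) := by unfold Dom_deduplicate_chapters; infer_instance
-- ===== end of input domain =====

-- B replaces A's seen-dict single pass by repeated head extraction: keep the first remaining
-- chapter and filter its key out of the rest, until the remainder is empty (no dict / seen set).


-- ===== PORT A =====
-- ch["chapter"] is ported as (Dict.mk ch).getD "chapter" ""; the "" default is only reached where
-- Python raises KeyError, which Pre_ excludes.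
def deduplicate_chapters (chapters : List (List (String × String))) : List (List (String × String)) :=
  (chapters.foldl
    (fun st ch =>
      let key := (PySem.Dict.mk ch).getD "chapter" ""
      if st.1.contains key then st
      else (st.1.insert key true, st.2 ++ [ch]))
    ((PySem.Dict.empty : PySem.Dict String Bool), [])).2

-- ===== PORT B =====
-- the while loop of Source B: result accumulator, rest shrinks each round (rest[1:] filtered by key)
def dedupAltLoop (result rest : List (List (String × String))) : List (List (String × String)) :=
  match rest with
  | [] => result
  | head :: tail =>
    let key := (PySem.Dict.mk head).getD "chapter" ""
    dedupAltLoop (result ++ [head])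
      (tail.filter (fun ch => (PySem.Dict.mk ch).getD "chapter" "" != key))
termination_by rest.length
decreasing_by simpa using Nat.lt_succ_of_le (List.length_filter_le _ tail)

def deduplicate_chapters_alt (chapters : List (List (String × String))) : List (List (String × String)) :=
  dedupAltLoop [] chapters

-- ===== PRECONDITION & SPEC =====
-- Pre_ excludes exactly the inputs on which A (and B) raise KeyError: a chapter dict without the "chapter" key.
def Pre_deduplicate_chapters (chapters : List (List (String × String))) : Prop :=
  ∀ ch ∈ chapters, (PySem.Dict.mk ch).contains "chapter" = true
instance (chapters : List (List (String × String))) : Decidable (Pre_deduplicate_chapters chapters) := by unfold Pre_deduplicate_chapters; infer_instance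

def pvWitness_deduplicate_chapters : (List (List (String × String))) :=
  [[("chapter", "1"), ("title", "a")], [("chapter", "1"), ("title", "b")], [("chapter", "2")]]

def Spec_deduplicate_chapters (chapters : List (List (String × String))) (out : List (List (String × String))) : Prop := out = deduplicate_chapters_alt chapters
instance (chapters : List (List (String × String))) (out : List (List (String × String))) : Decidable (Spec_deduplicate_chapters chapters out) := by unfold Spec_deduplicate_chapters; infer_instance

-- ===== CLAIM (what is proved, stated in full; the proofs are below) =====
def Claim_equal_deduplicate_chapters : Prop := ∀ (chapters : List (List (String × String))), Dom_deduplicate_chapters chapters → Pre_deduplicate_chapters chapters → Spec_deduplicate_chapters chapters (deduplicate_chapters chapters)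

-- ===== LEMMAS AND PROOFS =====

-- Bridge invariant: A's fold over `rest` with seen-dict `seen` and accumulated `res` produces
-- what B's loop produces from `res` on `rest` with the already-seen keys filtered out.
theorem dedup_bridge (rest : List (List (String × String)))
    (seen : PySem.Dict String Bool) (res : List (List (String × String))) :
    (rest.foldl
      (fun st ch =>
        let key := (PySem.Dict.mk ch).getD "chapter" ""
        if st.1.contains key then st
        else (st.1.insert key true, st.2 ++ [ch]))
      (seen, res)).2
    = dedupAltLoop res
        (rest.filter (fun ch => !(seen.contains ((PySem.Dict.mk ch).getD "chapter" "")))) := by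
  induction rest generalizing seen res with
  | nil => simp [dedupAltLoop]
  | cons h t ih =>
    simp only [List.foldl_cons, List.filter_cons]
    by_cases hc : seen.contains ((PySem.Dict.mk h).getD "chapter" "") = true
    · simp only [hc, if_true, Bool.not_true, Bool.false_eq_true, if_false]
      exact ih seen res
    · have hcb : seen.contains ((PySem.Dict.mk h).getD "chapter" "") = false := by simpa using hc
      simp only [hcb, Bool.false_eq_true, if_false, Bool.not_false, if_true]
      rw [ih (seen.insert ((PySem.Dict.mk h).getD "chapter" "") true) (res ++ [h])]
      rw [dedupAltLoop]
      congr 1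
      rw [List.filter_filter]
      apply List.filter_congr
      intro ch _
      rcases hk : (((PySem.Dict.mk ch).getD "chapter" "") == ((PySem.Dict.mk h).getD "chapter" "")) with _ | _
      · simp [PySem.Dict.contains_insert, bne, hk]
      · have : ((PySem.Dict.mk ch).getD "chapter" "") = ((PySem.Dict.mk h).getD "chapter" "") := by
          simpa using hk
        simp [PySem.Dict.contains_insert, bne, hk]

-- ===== VERDICT (by name: the statement is the Claim_ definition above) =====
theorem deduplicate_chapters_spec : Claim_equal_deduplicate_chapters := by
  intro chapters _ _
  unfold Spec_deduplicate_chapters deduplicate_chapters deduplicate_chapters_alt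
  rw [dedup_bridge]
  congr 1
  simp [PySem.Dict.contains, PySem.Dict.empty]
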